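-- pv_equiv track=rewrite | github.com/dmur09/PhishGuard | app.py | parse_behavior_analysis
-- ===== SOURCE A (Python) =====
-- def parse_behavior_analysis(behavior):
--     """Extract the initial URL, final URL, and whether redirects were detected from the behavior analysis."""
--     initial_url = ""
--     final_url = ""
--     redirects_detected = "No redirects detected."
--
--     if "Initial URL" in behavior:
--         initial_url_line = [line for line in behavior.split("<br>") if "Initial URL" in line]
--         if initial_url_line:
--             initial_url = initial_url_line[0].split("Initial URL:")[1].strip()
--
--     if "Final URL" in behavior:
--         final_url_line = [line for line in behavior.split("<br>") if "Final URL" in line]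
--         if final_url_line:
--             final_url = final_url_line[0].split("Final URL:")[1].strip()
--
--     if "redirected" in behavior:
--         redirects_detected = "Redirects detected."
--
--     return initial_url, final_url, redirects_detected
-- ===== SOURCE B (Python) =====
-- def _extract(line, key):
--     # key is "Initial URL:" / "Final URL:"; like A this raises IndexError when the
--     # colon-less phrase appears in the line without the colon form.
--     return line.split(key)[1].strip()
--
--
-- def parse_behavior_analysis(behavior):
--     """Extract the initial URL, final URL, and whether redirects were detected from the behavior analysis."""
--     initial_url = ""
--     final_url = ""
--     found_initial = False
--     found_final = False
--     for line in behavior.split("<br>"):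
--         if not found_initial and "Initial URL" in line:
--             initial_url = _extract(line, "Initial URL:")
--             found_initial = True
--         if not found_final and "Final URL" in line:
--             final_url = _extract(line, "Final URL:")
--             found_final = True
--     redirects = "Redirects detected." if "redirected" in behavior else "No redirects detected."
--     return initial_url, final_url, redirects
-- ===== Notes on version B (the rewrite author's own statement) =====
-- stated objective: simpler
-- what changed: B splits the text on '<br>' once and makes a single pass over the lines with two found-flags, instead of A's two whole-text containment checks plus two filtering comprehensions that each re-split the text.
import Mathlib
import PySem

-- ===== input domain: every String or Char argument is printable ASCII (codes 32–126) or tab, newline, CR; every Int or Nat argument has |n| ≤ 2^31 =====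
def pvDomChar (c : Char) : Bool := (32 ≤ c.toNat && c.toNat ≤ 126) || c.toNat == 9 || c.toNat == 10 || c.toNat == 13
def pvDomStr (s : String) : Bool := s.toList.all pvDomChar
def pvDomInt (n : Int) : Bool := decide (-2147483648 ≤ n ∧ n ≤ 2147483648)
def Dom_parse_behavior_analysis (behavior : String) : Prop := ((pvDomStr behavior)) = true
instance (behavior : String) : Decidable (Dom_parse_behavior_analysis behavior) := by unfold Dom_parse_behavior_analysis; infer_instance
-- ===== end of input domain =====

-- B replaces A's two containment checks plus two filtering comprehensions (each re-splitting
-- the text on "<br>") by one split and a single pass over the lines with found-flags (simpler).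


-- ===== PORT A =====
-- behavior.split("<br>"): the separator is the non-empty literal "<br>", so split? is always `some`
-- line.split("…URL:")[1]: index 1 out of range = IndexError; those inputs are excluded by Pre_,
-- the `.getD ""` default is never reached inside Pre_.
def parse_behavior_analysis (behavior : String) : String × String × String :=
  let redirects_detected := "No redirects detected."
  let initial_url :=
    if PySem.Str.isIn "Initial URL" behavior then
      let initial_url_line :=
        ((PySem.Str.split? behavior "<br>").getD []).filter
          (fun line => PySem.Str.isIn "Initial URL" line)
      match initial_url_line with
      | [] => ""
      | line :: _ =>
          PySem.Str.strip
            ((PySem.List.pyGet? ((PySem.Str.split? line "Initial URL:").getD []) 1).getD "")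
    else ""
  let final_url :=
    if PySem.Str.isIn "Final URL" behavior then
      let final_url_line :=
        ((PySem.Str.split? behavior "<br>").getD []).filter
          (fun line => PySem.Str.isIn "Final URL" line)
      match final_url_line with
      | [] => ""
      | line :: _ =>
          PySem.Str.strip
            ((PySem.List.pyGet? ((PySem.Str.split? line "Final URL:").getD []) 1).getD "")
    else ""
  let redirects_detected :=
    if PySem.Str.isIn "redirected" behavior then "Redirects detected." else redirects_detected
  (initial_url, final_url, redirects_detected)

-- ===== PORT B =====
-- _extract(line, key) = line.split(key)[1].strip(); the `.getD ""` is the IndexError case, outside Pre_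
def pvExtract (line key : String) : String :=
  PySem.Str.strip ((PySem.List.pyGet? ((PySem.Str.split? line key).getD []) 1).getD "")

-- one iteration of B's loop; state = ((initial_url, found_initial), (final_url, found_final))
def pvStep (st : (String × Bool) × (String × Bool)) (line : String) :
    (String × Bool) × (String × Bool) :=
  let stI := if !st.1.2 && PySem.Str.isIn "Initial URL" line then
      (pvExtract line "Initial URL:", true) else st.1
  let stF := if !st.2.2 && PySem.Str.isIn "Final URL" line then
      (pvExtract line "Final URL:", true) else st.2
  (stI, stF)

def parse_behavior_analysis_alt (behavior : String) : String × String × String :=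
  let st := ((PySem.Str.split? behavior "<br>").getD []).foldl pvStep (("", false), ("", false))
  let redirects :=
    if PySem.Str.isIn "redirected" behavior then "Redirects detected." else "No redirects detected."
  (st.1.1, st.2.1, redirects)

-- ===== PRECONDITION & SPEC =====
-- the first "<br>"-line of `behavior` that mentions `key` (if any) also contains `key ++ ":"`
def pvLineOk (behavior key : String) : Bool :=
  (((PySem.Str.split? behavior "<br>").getD []).find? (fun line => PySem.Str.isIn key line)).all
    (fun line => PySem.Str.isIn (key ++ ":") line)

-- Pre_ excludes exactly the inputs on which the Python A raises IndexError: those where the first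
-- "<br>"-line containing "Initial URL" (resp. "Final URL") does not contain the colon form
-- "Initial URL:" (resp. "Final URL:"), so that line.split("… URL:")[1] is out of range.
def Pre_parse_behavior_analysis (behavior : String) : Prop :=
  pvLineOk behavior "Initial URL" = true ∧ pvLineOk behavior "Final URL" = true
instance (behavior : String) : Decidable (Pre_parse_behavior_analysis behavior) := by
  unfold Pre_parse_behavior_analysis; infer_instance

def pvWitness_parse_behavior_analysis : String :=
  "Initial URL: http://a.example<br>Final URL: http://b.example<br>redirected"

def Spec_parse_behavior_analysis (behavior : String) (out : String × String × String) : Prop :=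
  out = parse_behavior_analysis_alt behavior
instance (behavior : String) (out : String × String × String) :
    Decidable (Spec_parse_behavior_analysis behavior out) := by
  unfold Spec_parse_behavior_analysis; infer_instance

-- ===== CLAIM (what is proved, stated in full; the proofs are below) =====
def Claim_equal_parse_behavior_analysis : Prop := ∀ (behavior : String), Dom_parse_behavior_analysis behavior → Pre_parse_behavior_analysis behavior → Spec_parse_behavior_analysis behavior (parse_behavior_analysis behavior)

-- ===== LEMMAS AND PROOFS =====

-- every piece produced by splitOn.go is an infix of s, given the loop invariant
theorem pvGoInfix (s sep : List Char) (fuel : Nat) (l cur : List Char) (acc : List (List Char))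
    (hl : (cur.reverse ++ l) <:+ s) (hacc : ∀ p ∈ acc, p <:+: s) :
    ∀ p ∈ PySem.Chars.splitOn.go sep fuel l cur acc, p <:+: s := by
  fun_induction PySem.Chars.splitOn.go with
  | case1 l cur acc =>
    intro p hp
    simp only [List.mem_reverse, List.mem_cons] at hp
    rcases hp with h | h
    · exact h ▸ hl.isInfix
    · exact hacc _ h
  | case2 fuel cur acc =>
    intro p hp
    simp only [List.mem_reverse, List.mem_cons] at hp
    rcases hp with h | h
    · subst h; exact (List.append_nil cur.reverse ▸ hl).isInfix
    · exact hacc _ h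
  | case3 fuel c rest cur acc hpre ih =>
    apply ih
    · simpa using ((List.drop_suffix sep.length _).trans ((List.suffix_append _ _).trans hl))
    · intro p hp
      rcases List.mem_cons.mp hp with h | h
      · exact h ▸ (List.prefix_append _ _).isInfix.trans hl.isInfix
      · exact hacc _ h
  | case4 fuel c rest cur acc hpre ih =>
    apply ih
    · simpa using hl
    · exact hacc

-- every line of behavior.split("<br>") is an infix of behavior
theorem pvMemSplitInfix (behavior l : String)
    (h : l ∈ (PySem.Str.split? behavior "<br>").getD []) : l.toList <:+: behavior.toList := by
  simp [PySem.Str.split?, PySem.Chars.split?] at h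
  obtain ⟨cs, hcs, rfl⟩ := h
  rw [String.toList_ofList]
  exact pvGoInfix behavior.toList _ _ _ _ _ (by simp) (by simp) cs hcs

-- if a line of the split contains `key`, so does behavior
theorem pvIsInOfLine (behavior l key : String)
    (hmem : l ∈ (PySem.Str.split? behavior "<br>").getD [])
    (hin : PySem.Str.isIn key l = true) : PySem.Str.isIn key behavior = true := by
  rw [PySem.Str.isIn_iff_infix] at hin ⊢
  exact hin.trans (pvMemSplitInfix behavior l hmem)

-- B's loop, first component: first match wins, characterised by find?
theorem pvFoldFst (lines : List String) (st : (String × Bool) × (String × Bool)) :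
    (lines.foldl pvStep st).1 =
      if st.1.2 then st.1 else
        match lines.find? (fun line => PySem.Str.isIn "Initial URL" line) with
        | some l => (pvExtract l "Initial URL:", true)
        | none => st.1 := by
  induction lines generalizing st with
  | nil => simp
  | cons l ls ih =>
    simp only [List.foldl_cons, ih, List.find?_cons]
    by_cases hf : st.1.2
    · simp [pvStep, hf]
    · by_cases hp : PySem.Str.isIn "Initial URL" l <;> simp at hp <;>
        simp [pvStep, hf, hp]

-- B's loop, second component
theorem pvFoldSnd (lines : List String) (st : (String × Bool) × (String × Bool)) :
    (lines.foldl pvStep st).2 =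
      if st.2.2 then st.2 else
        match lines.find? (fun line => PySem.Str.isIn "Final URL" line) with
        | some l => (pvExtract l "Final URL:", true)
        | none => st.2 := by
  induction lines generalizing st with
  | nil => simp
  | cons l ls ih =>
    simp only [List.foldl_cons, ih, List.find?_cons]
    by_cases hf : st.2.2
    · simp [pvStep, hf]
    · by_cases hp : PySem.Str.isIn "Final URL" l <;> simp at hp <;>
        simp [pvStep, hf, hp]

-- the per-field value both programs compute, as a function of find?
theorem pvField (behavior key colon : String) :
    (if PySem.Str.isIn key behavior then
      match ((PySem.Str.split? behavior "<br>").getD []).filter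
          (fun line => PySem.Str.isIn key line) with
      | [] => ""
      | line :: _ => pvExtract line colon
     else "") =
      match ((PySem.Str.split? behavior "<br>").getD []).find?
          (fun line => PySem.Str.isIn key line) with
      | some l => pvExtract l colon
      | none => "" := by
  rw [← List.head?_filter]
  by_cases h : PySem.Str.isIn key behavior
  · simp only [h, if_true]
    cases ((PySem.Str.split? behavior "<br>").getD []).filter
        (fun line => PySem.Str.isIn key line) with
    | nil => rfl
    | cons a t => rfl
  · simp only [h, if_false]
    rcases hf : (((PySem.Str.split? behavior "<br>").getD []).filter
        (fun line => PySem.Str.isIn key line)) with _ | ⟨a, t⟩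
    · rfl
    · exfalso
      have hmem : a ∈ ((PySem.Str.split? behavior "<br>").getD []).filter
          (fun line => PySem.Str.isIn key line) := by rw [hf]; exact List.mem_cons_self
      rw [List.mem_filter] at hmem
      exact h (pvIsInOfLine behavior a key hmem.1 hmem.2)

-- ===== VERDICT (by name: the statement is the Claim_ definition above) =====
theorem parse_behavior_analysis_spec : Claim_equal_parse_behavior_analysis := by
  intro behavior _ _
  unfold Spec_parse_behavior_analysis parse_behavior_analysis parse_behavior_analysis_alt
  simp only [pvFoldFst, pvFoldSnd, Bool.false_eq_true, if_false]
  refine Prod.ext ?_ (Prod.ext ?_ rfl)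
  · have := pvField behavior "Initial URL" "Initial URL:"
    simp only [pvExtract] at this
    rw [this]
    cases ((PySem.Str.split? behavior "<br>").getD []).find?
        (fun line => PySem.Str.isIn "Initial URL" line) with
    | none => rfl
    | some l => simp [pvExtract]
  · have := pvField behavior "Final URL" "Final URL:"
    simp only [pvExtract] at this
    rw [this]
    cases ((PySem.Str.split? behavior "<br>").getD []).find?
        (fun line => PySem.Str.isIn "Final URL" line) with
    | none => rfl
    | some l => simp [pvExtract]
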